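-- pv_equiv track=rewrite | github.com/v-t-9/PythonDataTypes-w3r | List/ex160.py | remove_first_num_elements
-- ===== SOURCE A (Python) =====
-- def remove_first_num_elements(l,n):
--     c = 1
--     res = []
--     for i in l:
--         if i % 2 != 0 or c>n:
--             res.append(i)
--         else:
--             c+=1
--
--     return res
-- ===== SOURCE B (Python) =====
-- def remove_first_num_elements(l, n):
--     even_idx = [i for i, x in enumerate(l) if x % 2 == 0]
--     remove = set(even_idx[:n]) if n > 0 else set()
--     return [x for i, x in enumerate(l) if i not in remove]
-- ===== Notes on version B (the rewrite author's own statement) =====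
-- stated objective: alternative
-- what changed: Replaces A's single counter-driven pass with an index-table approach: first collect the indices of even elements, build the removal set from the first n of them, then filter by index in a second pass.
import Mathlib
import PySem

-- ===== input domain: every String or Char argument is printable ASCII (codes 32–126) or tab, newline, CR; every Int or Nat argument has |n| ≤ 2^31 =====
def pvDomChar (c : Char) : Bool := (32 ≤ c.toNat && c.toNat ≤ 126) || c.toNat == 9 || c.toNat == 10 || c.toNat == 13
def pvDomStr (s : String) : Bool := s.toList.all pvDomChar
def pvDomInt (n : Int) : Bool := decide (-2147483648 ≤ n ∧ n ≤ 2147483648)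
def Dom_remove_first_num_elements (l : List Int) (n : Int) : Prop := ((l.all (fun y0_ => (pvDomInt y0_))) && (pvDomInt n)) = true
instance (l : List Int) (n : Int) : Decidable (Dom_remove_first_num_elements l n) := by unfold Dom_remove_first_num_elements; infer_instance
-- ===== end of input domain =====

-- B replaces A's counter-driven single pass by an index-table decomposition (collect even
-- indices, build a removal set of the first n, filter by index); same cost, alternative structure.

-- ===== PORT A =====
def remove_first_num_elements (l : List Int) (n : Int) : List Int :=
  (l.foldl (fun (s : Int × List Int) i =>
      if PySem.Int.mod i 2 ≠ 0 ∨ s.1 > n then (s.1, s.2 ++ [i]) else (s.1 + 1, s.2))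
    (1, [])).2

-- ===== PORT B =====
def remove_first_num_elements_alt (l : List Int) (n : Int) : List Int :=
  let evenIdx := ((PySem.List.enumerate l).filter (fun p => PySem.Int.mod p.2 2 == 0)).map (fun p => p.1)
  let remove : PySem.Set Int :=
    if n > 0 then PySem.Set.ofList (PySem.List.slice evenIdx none (some n)) else PySem.Set.empty
  ((PySem.List.enumerate l).filter (fun p => !(PySem.Set.contains remove p.1))).map (fun p => p.2)

-- ===== PRECONDITION & SPEC =====
def Spec_remove_first_num_elements (l : List Int) (n : Int) (out : List Int) : Prop := out = remove_first_num_elements_alt l n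
instance (l : List Int) (n : Int) (out : List Int) : Decidable (Spec_remove_first_num_elements l n out) := by unfold Spec_remove_first_num_elements; infer_instance

-- ===== CLAIM (what is proved, stated in full; the proofs are below) =====
def Claim_equal_remove_first_num_elements : Prop := ∀ (l : List Int) (n : Int), Dom_remove_first_num_elements l n → Spec_remove_first_num_elements l n (remove_first_num_elements l n)

-- ===== LEMMAS AND PROOFS =====

/-- Reference: remove the first `k` even elements. -/
def refRm : List Int → Nat → List Int
  | [], _ => []
  | x :: xs, k =>
    if PySem.Int.mod x 2 ≠ 0 then x :: refRm xs k
    else match k with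
      | 0 => x :: refRm xs 0
      | k' + 1 => refRm xs k'

/-- A's loop as structural recursion on the list, counter `c`. -/
def auxA (n : Int) : List Int → Int → List Int
  | [], _ => []
  | x :: xs, c => if PySem.Int.mod x 2 ≠ 0 ∨ c > n then x :: auxA n xs c else auxA n xs (c + 1)

theorem foldA_eq (n : Int) : ∀ (l : List Int) (c : Int) (res : List Int),
    (l.foldl (fun (s : Int × List Int) i =>
      if PySem.Int.mod i 2 ≠ 0 ∨ s.1 > n then (s.1, s.2 ++ [i]) else (s.1 + 1, s.2))
      (c, res)).2 = res ++ auxA n l c := by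
  intro l
  induction l with
  | nil => intro c res; simp only [List.foldl_nil, auxA, List.append_nil]
  | cons x xs ih =>
    intro c res
    simp only [List.foldl_cons, auxA]
    by_cases h : PySem.Int.mod x 2 ≠ 0 ∨ c > n
    · rw [if_pos h, if_pos h, ih]
      simp only [List.append_assoc, List.singleton_append]
    · rw [if_neg h, if_neg h, ih]

theorem auxA_eq_refRm (n : Int) : ∀ (l : List Int) (c : Int),
    auxA n l c = refRm l ((n - c + 1).toNat) := by
  intro l
  induction l with
  | nil => intro c; simp only [auxA, refRm]
  | cons x xs ih =>
    intro c
    simp only [auxA, refRm]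
    by_cases hx : PySem.Int.mod x 2 ≠ 0
    · rw [if_pos (Or.inl hx), if_pos hx, ih]
    · rw [if_neg hx]
      by_cases hc : c > n
      · have h' : PySem.Int.mod x 2 ≠ 0 ∨ c > n := Or.inr hc
        have h0 : (n - c + 1).toNat = 0 := by omega
        rw [if_pos h', h0, ih, h0]
      · have h' : ¬ (PySem.Int.mod x 2 ≠ 0 ∨ c > n) := by tauto
        have h1 : (n - c + 1).toNat = (n - c).toNat + 1 := by omega
        have h2 : n - (c + 1) + 1 = n - c := by ring
        rw [if_neg h', h1, ih, h2]

/-- The even indices of `l`, counting from `s`. -/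
def evnIdx : List Int → Int → List Int
  | [], _ => []
  | x :: xs, s => if PySem.Int.mod x 2 = 0 then s :: evnIdx xs (s + 1) else evnIdx xs (s + 1)

theorem evnIdx_eq : ∀ (l : List Int) (s : Int),
    ((PySem.List.enumerate l s).filter (fun p => PySem.Int.mod p.2 2 == 0)).map (fun p => p.1)
      = evnIdx l s := by
  intro l
  induction l with
  | nil => intro s; simp only [PySem.List.enumerate_nil, List.filter_nil, List.map_nil, evnIdx]
  | cons x xs ih =>
    intro s
    rw [PySem.List.enumerate_cons]
    simp only [List.filter_cons, evnIdx]
    by_cases h : PySem.Int.mod x 2 = 0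
    · have hb : ((PySem.Int.mod x 2 == 0) = true) := beq_iff_eq.mpr h
      rw [if_pos hb, if_pos h, List.map_cons, ih]
    · have hb : ¬ ((PySem.Int.mod x 2 == 0) = true) := by
        simpa using h
      rw [if_neg hb, if_neg h, ih]

theorem evnIdx_ge : ∀ (l : List Int) (s i : Int), i ∈ evnIdx l s → s ≤ i := by
  intro l
  induction l with
  | nil => intro s i h; simp only [evnIdx, List.not_mem_nil] at h
  | cons x xs ih =>
    intro s i h
    simp only [evnIdx] at h
    by_cases hx : PySem.Int.mod x 2 = 0
    · rw [if_pos hx] at h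
      rcases List.mem_cons.1 h with h | h
      · omega
      · have := ih (s + 1) i h; omega
    · rw [if_neg hx] at h
      have := ih (s + 1) i h; omega

theorem contains_ofList_decide (S : List Int) (y : Int) :
    (PySem.Set.ofList S).contains y = decide (y ∈ S) := by
  by_cases h : y ∈ S <;>
    simp [h, PySem.Set.mem_ofList]

theorem filterB_eq (l : List Int) : ∀ (s : Int) (k : Nat),
    ((PySem.List.enumerate l s).filter
        (fun p => !(decide (p.1 ∈ (evnIdx l s).take k)))).map (fun p => p.2)
      = refRm l k := by
  induction l with
  | nil => intro s k; simp only [PySem.List.enumerate_nil, List.filter_nil, List.map_nil, refRm]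
  | cons x xs ih =>
    intro s k
    rw [PySem.List.enumerate_cons]
    have hge : ∀ i ∈ evnIdx xs (s + 1), s + 1 ≤ i := fun i h => evnIdx_ge xs (s + 1) i h
    by_cases hx : PySem.Int.mod x 2 = 0
    · have he : evnIdx (x :: xs) s = s :: evnIdx xs (s + 1) := by
        simp only [evnIdx, if_pos hx]
      cases k with
      | zero =>
        have hr : refRm (x :: xs) 0 = x :: refRm xs 0 := by
          simp only [refRm, if_neg (not_not_intro hx)]
        have hthis := ih (s + 1) 0
        simp only [List.take_zero] at hthis
        simp only [he, List.take_zero, List.filter_cons, hr]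
        rw [if_pos (by simp)]
        simp only [List.map_cons]
        exact congrArg (List.cons x) hthis
      | succ k' =>
        have hr : refRm (x :: xs) (k' + 1) = refRm xs k' := by
          simp only [refRm, if_neg (not_not_intro hx)]
        simp only [he, List.take_succ_cons, List.filter_cons, hr]
        rw [if_neg (by simp)]
        have hcongr : List.filter
            (fun p => !(decide (p.1 ∈ s :: List.take k' (evnIdx xs (s + 1)))))
            (PySem.List.enumerate xs (s + 1))
          = List.filter
            (fun p => !(decide (p.1 ∈ List.take k' (evnIdx xs (s + 1)))))
            (PySem.List.enumerate xs (s + 1)) := by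
          apply List.filter_congr
          intro p hp
          obtain ⟨j, hj, rfl⟩ := (PySem.List.mem_enumerate_iff _ _ _).1 hp
          have hne : (s + 1 + (j : Int)) ≠ s := by omega
          simp [List.mem_cons, hne]
        rw [hcongr, ih (s + 1) k']
    · have he : evnIdx (x :: xs) s = evnIdx xs (s + 1) := by
        simp only [evnIdx, if_neg hx]
      have hr : refRm (x :: xs) k = x :: refRm xs k := by
        simp only [refRm, if_pos hx]
      have hns : s ∉ List.take k (evnIdx xs (s + 1)) := by
        intro h
        have := hge s (List.mem_of_mem_take h); omega
      simp only [he, List.filter_cons, hr]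
      rw [if_pos (by simp [hns])]
      simp only [List.map_cons]
      rw [ih (s + 1) k]

theorem altB_eq_refRm (l : List Int) (n : Int) :
    remove_first_num_elements_alt l n = refRm l n.toNat := by
  unfold remove_first_num_elements_alt
  simp only [evnIdx_eq]
  have hbridge : ∀ (S : List Int),
      ((PySem.List.enumerate l 0).filter
          (fun p => !(PySem.Set.contains (PySem.Set.ofList S) p.1)))
        = ((PySem.List.enumerate l 0).filter (fun p => !(decide (p.1 ∈ S)))) := by
    intro S
    apply List.filter_congr
    intro p _
    rw [contains_ofList_decide]
  by_cases hn : n > 0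
  · rw [if_pos hn]
    have hsl : PySem.List.slice (evnIdx l 0) none (some n) = (evnIdx l 0).take n.toNat :=
      PySem.List.slice_to _ (by omega)
    rw [hsl, hbridge, filterB_eq l 0 n.toNat]
  · rw [if_neg hn]
    have h0 : n.toNat = 0 := by omega
    have hempty : (PySem.Set.empty : PySem.Set Int) = PySem.Set.ofList ([] : List Int) := rfl
    have htake : ([] : List Int) = (evnIdx l 0).take 0 := by simp
    rw [h0, hempty, htake, hbridge, filterB_eq l 0 0]

theorem A_eq_refRm (l : List Int) (n : Int) :
    remove_first_num_elements l n = refRm l n.toNat := by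
  unfold remove_first_num_elements
  rw [foldA_eq n l 1 [], auxA_eq_refRm n l 1]
  have h : n - 1 + 1 = n := by ring
  rw [h, List.nil_append]

-- ===== VERDICT (by name: the statement is the Claim_ definition above) =====
theorem remove_first_num_elements_spec : Claim_equal_remove_first_num_elements := by
  intro l n _
  unfold Spec_remove_first_num_elements
  rw [A_eq_refRm, altB_eq_refRm]
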